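-- pv_equiv track=rewrite | github.com/zsxkib/TTDS-G35-CW3 | source/50%-functions.py | proxRec
-- ===== SOURCE A (Python) =====
-- def proxRec(index, queryTerms, d, absol, out=None):
--     if queryTerms == []:
--         return out
--     else:
--         key = queryTerms.pop()
--         if out == None:
--             return proxRec(index, queryTerms, d, absol, index[key])
--         if key not in index:
--             return {}
--         for l in dict(out):
--             if l in index[key]:
--                 for n in list(out[l]):
--                     if absol and True not in [n+a in index[key][l] for a in range(-d,d+1) if a != 0]:
--                         out[l].remove(n)
--                     if not absol and True not in [n+a in index[key][l] for a in range(0,d+1) if a != 0]: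
--                         out[l].remove(n)
--             if l not in index[key] or out[l] == []:
--                 out.pop(l)
--         return proxRec(index, queryTerms, d, absol, out)
-- ===== SOURCE B (Python) =====
-- # Iterative, non-mutating re-implementation: instead of enumerating all 2d offsets
-- # and testing membership for each (A), scan each posting once testing interval bounds.
-- # Equivalence is about the return value only: A pops queryTerms and mutates index/out
-- # in place; B mutates nothing.
-- def proxRec(index, queryTerms, d, absol, out=None):
--     terms = queryTerms[::-1]
--     if out is None:
--         if not terms:
--             return None
--         out = index[terms[0]]
--         terms = terms[1:]
--     result = {l: list(ns) for l, ns in out.items()}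
--     for key in terms:
--         if key not in index:
--             return {}
--         post = index[key]
--         filtered = {}
--         for l, ns in result.items():
--             if l in post:
--                 pl = post[l]
--                 if absol:
--                     kept = [n for n in ns if any(n - d <= m <= n + d and m != n for m in pl)]
--                 else:
--                     kept = [n for n in ns if any(n + 1 <= m <= n + d for m in pl)]
--                 if kept:
--                     filtered[l] = kept
--         result = filtered
--     return result
-- ===== Notes on version B (the rewrite author's own statement) =====
-- stated objective: alternative
-- what changed: Replaces A's tail recursion with destructive in-place removal and a per-position membership scan over all 2d offsets (range(-d,d+1)) by an iterative loop over the reversed term list that rebuilds each postings dict non-destructively with a single interval-bound test (n-d <= m <= n+d, m != n) per posting.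
-- outside the precondition, e.g. on proxRec({'t': {'D': [2, 1]}}, ['t', 't'], 1, False, None): A returns {}, B returns {'D': [1]}; on proxRec({}, [], 1, True, None): A returns None, B returns None; on proxRec({}, ['t'], 1, True, None): A raises KeyError, B raises KeyError
import Mathlib
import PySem

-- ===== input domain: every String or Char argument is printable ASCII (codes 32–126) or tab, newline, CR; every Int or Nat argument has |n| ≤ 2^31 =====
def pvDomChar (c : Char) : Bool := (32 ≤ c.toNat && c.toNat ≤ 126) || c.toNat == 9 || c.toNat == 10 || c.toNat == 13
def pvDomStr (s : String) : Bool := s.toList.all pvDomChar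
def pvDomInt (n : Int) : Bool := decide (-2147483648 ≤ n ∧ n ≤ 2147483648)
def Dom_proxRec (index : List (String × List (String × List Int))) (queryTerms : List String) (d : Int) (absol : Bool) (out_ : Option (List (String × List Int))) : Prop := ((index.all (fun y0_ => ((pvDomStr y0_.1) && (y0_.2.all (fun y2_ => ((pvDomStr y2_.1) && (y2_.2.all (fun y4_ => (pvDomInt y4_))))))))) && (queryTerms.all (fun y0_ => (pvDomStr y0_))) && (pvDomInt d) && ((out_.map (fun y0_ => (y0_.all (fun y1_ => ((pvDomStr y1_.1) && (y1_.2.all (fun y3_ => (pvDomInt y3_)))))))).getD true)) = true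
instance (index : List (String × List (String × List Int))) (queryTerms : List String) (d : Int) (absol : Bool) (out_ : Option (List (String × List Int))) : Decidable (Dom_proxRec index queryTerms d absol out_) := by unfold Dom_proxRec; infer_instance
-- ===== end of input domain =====

-- B replaces A's tail recursion + per-position scan over all 2d offsets by an iterative
-- loop with an interval test per posting; equivalence is about the RETURN value only
-- (the Python A pops queryTerms and mutates index/out in place, B mutates nothing).

-- ===== PORT A =====
-- Python-dict primitives on association lists with unique keys (exact: first match,
-- overwrite in place, pop removes the entry).
def dGet? {α : Type} (d : List (String × α)) (k : String) : Option α :=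
  match d with
  | [] => none
  | (k', v) :: t => if k' = k then some v else dGet? t k

def dSet {α : Type} (d : List (String × α)) (k : String) (v : α) : List (String × α) :=
  match d with
  | [] => [(k, v)]
  | (k', v') :: t => if k' = k then (k, v) :: t else (k', v') :: dSet t k v

def dDel {α : Type} (d : List (String × α)) (k : String) : List (String × α) :=
  match d with
  | [] => []
  | (k', v') :: t => if k' = k then t else (k', v') :: dDel t k

-- inner 'for n in list(out[l]):' loop with the two remove branches
def aInner (ipl : List Int) (d : Int) (absol : Bool) (ns : List Int) : List Int :=
  ns.foldl (fun cur n =>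
    let cur := if absol && !((((PySem.List.pyRange (-d) (d+1) 1).filter (fun a => !(a == 0))).map (fun a => ipl.contains (n+a))).contains true)
      then (PySem.List.remove? cur n).getD cur else cur
    if !absol && !((((PySem.List.pyRange 0 (d+1) 1).filter (fun a => !(a == 0))).map (fun a => ipl.contains (n+a))).contains true)
      then (PySem.List.remove? cur n).getD cur else cur) ns

-- 'for l in dict(out):' loop (snapshot of the keys, out mutated in place)
def aStep (ikey : List (String × List Int)) (d : Int) (absol : Bool) (out : List (String × List Int)) : List (String × List Int) :=
  (out.map Prod.fst).foldl (fun out l =>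
    let out := match dGet? ikey l with
      | some ipl => dSet out l (aInner ipl d absol ((dGet? out l).getD []))
      | none => out
    if (dGet? ikey l).isNone || ((dGet? out l).getD []).isEmpty then dDel out l else out) out

def proxRec (index : List (String × List (String × List Int))) (queryTerms : List String) (d : Int) (absol : Bool) (out_ : Option (List (String × List Int))) : List (String × List Int) :=
  if _h : queryTerms = [] then out_.getD []   -- Python returns out (None when out_ = none: outside Pre_)
  else
    let key := (queryTerms.getLast?).getD ""   -- queryTerms.pop()
    match out_ with
    | none => proxRec index queryTerms.dropLast d absol (some ((dGet? index key).getD []))   -- index[key]; KeyError outside Pre_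
    | some out =>
      match dGet? index key with
      | none => []
      | some ikey => proxRec index queryTerms.dropLast d absol (some (aStep ikey d absol out))
termination_by queryTerms.length
decreasing_by all_goals (simp [List.length_dropLast]; exact List.length_pos_iff.mpr _h)

-- ===== PORT B =====
def bTest (d : Int) (absol : Bool) (pl : List Int) (n : Int) : Bool :=
  if absol then pl.any (fun m => decide (n - d ≤ m ∧ m ≤ n + d ∧ m ≠ n))
  else pl.any (fun m => decide (n + 1 ≤ m ∧ m ≤ n + d))

def bStep (post : List (String × List Int)) (d : Int) (absol : Bool) (result : List (String × List Int)) : List (String × List Int) :=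
  result.foldl (fun acc e =>
    match dGet? post e.1 with
    | none => acc
    | some pl =>
      let kept := e.2.filter (bTest d absol pl)
      if kept.isEmpty then acc else acc ++ [(e.1, kept)]) []

def bLoop (index : List (String × List (String × List Int))) (d : Int) (absol : Bool) : List String → List (String × List Int) → List (String × List Int)
  | [], result => result
  | key :: rest, result =>
    match dGet? index key with
    | none => []
    | some post => bLoop index d absol rest (bStep post d absol result)

def proxRec_alt (index : List (String × List (String × List Int))) (queryTerms : List String) (d : Int) (absol : Bool) (out_ : Option (List (String × List Int))) : List (String × List Int) :=
  let terms := queryTerms.reverse   -- queryTerms[::-1] (PySem.List.slice?_none_none_neg_one)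
  match out_ with
  | none =>
    match terms with
    | [] => []   -- Python returns None here: outside Pre_
    | t0 :: rest => bLoop index d absol rest ((dGet? index t0).getD [])
  | some out => bLoop index d absol terms out

-- ===== PRECONDITION & SPEC =====
-- Pre_ excludes: calls with out=None and empty queryTerms (A returns None, not a dict) or a
-- last query term absent from index (KeyError); calls with out=None whose last term occurs
-- again in queryTerms, on which A's value depends on accidental aliasing of out with
-- index[lastTerm] (A mutates that very dict while reading it); and dict-typed arguments with
-- duplicate keys, which a Python dict cannot represent.
def Pre_proxRec (index : List (String × List (String × List Int))) (queryTerms : List String) (d : Int) (absol : Bool) (out_ : Option (List (String × List Int))) : Prop :=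
  (decide ((index.map Prod.fst).Nodup) &&
   index.all (fun e => decide ((e.2.map Prod.fst).Nodup)) &&
   (match out_ with
    | some out => decide ((out.map Prod.fst).Nodup)
    | none =>
      (!queryTerms.isEmpty) &&
      ((index.map Prod.fst).contains ((queryTerms.getLast?).getD "")) &&
      !((queryTerms.dropLast).contains ((queryTerms.getLast?).getD "")))) = true
instance (index : List (String × List (String × List Int))) (queryTerms : List String) (d : Int) (absol : Bool) (out_ : Option (List (String × List Int))) : Decidable (Pre_proxRec index queryTerms d absol out_) := by unfold Pre_proxRec; infer_instance

def pvWitness_proxRec : (List (String × List (String × List Int))) × List String × Int × Bool × (Option (List (String × List Int))) :=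
  ([("a", [("d1", [1, 2, 5]), ("d2", [3])]), ("b", [("d1", [2])])], ["b", "a"], 1, true, none)

def Spec_proxRec (index : List (String × List (String × List Int))) (queryTerms : List String) (d : Int) (absol : Bool) (out_ : Option (List (String × List Int))) (out : List (String × List Int)) : Prop := out = proxRec_alt index queryTerms d absol out_
instance (index : List (String × List (String × List Int))) (queryTerms : List String) (d : Int) (absol : Bool) (out_ : Option (List (String × List Int))) (out : List (String × List Int)) : Decidable (Spec_proxRec index queryTerms d absol out_ out) := by unfold Spec_proxRec; infer_instance

-- ===== CLAIM (what is proved, stated in full; the proofs are below) =====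
def Claim_equal_proxRec : Prop := ∀ (index : List (String × List (String × List Int))) (queryTerms : List String) (d : Int) (absol : Bool) (out_ : Option (List (String × List Int))), Dom_proxRec index queryTerms d absol out_ → Pre_proxRec index queryTerms d absol out_ → Spec_proxRec index queryTerms d absol out_ (proxRec index queryTerms d absol out_)

-- ===== LEMMAS AND PROOFS =====

theorem condAbs (ipl : List Int) (d n : Int) :
  ((((PySem.List.pyRange (-d) (d+1) 1).filter (fun a => !(a == 0))).map (fun a => ipl.contains (n+a))).contains true) = bTest d true ipl n := by
  apply Bool.eq_iff_iff.mpr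
  simp [bTest, List.any_eq_true, List.mem_filter, PySem.List.mem_pyRange_one]
  constructor
  · rintro ⟨a, ⟨⟨ha1, ha2⟩, ha0⟩, hmem⟩
    exact ⟨n + a, hmem, by omega, by omega, by omega⟩
  · rintro ⟨m, hmem, h1, h2, h3⟩
    exact ⟨m - n, ⟨⟨by omega, by omega⟩, by omega⟩, by simpa using hmem⟩

theorem condRel (ipl : List Int) (d n : Int) :
  ((((PySem.List.pyRange 0 (d+1) 1).filter (fun a => !(a == 0))).map (fun a => ipl.contains (n+a))).contains true) = bTest d false ipl n := by
  apply Bool.eq_iff_iff.mpr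
  simp [bTest, List.any_eq_true, List.mem_filter, PySem.List.mem_pyRange_one]
  constructor
  · rintro ⟨a, ⟨⟨ha1, ha2⟩, ha0⟩, hmem⟩
    exact ⟨n + a, hmem, by omega, by omega⟩
  · rintro ⟨m, hmem, h1, h2⟩
    exact ⟨m - n, ⟨⟨by omega, by omega⟩, by omega⟩, by simpa using hmem⟩

theorem remove?_append_cons (n : Int) : ∀ (p r : List Int), n ∉ p →
    PySem.List.remove? (p ++ n :: r) n = some (p ++ r) := by
  intro p
  induction p with
  | nil => intro r _; simp
  | cons x t ih =>
    intro r hn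
    have hx : x ≠ n := fun h => hn (h ▸ List.mem_cons_self)
    rw [List.cons_append, PySem.List.remove?_cons_of_ne _ hx, ih r (fun h => hn (List.mem_cons_of_mem _ h))]
    rfl

theorem remove_fold (test : Int → Bool) :
    ∀ (suffix pre : List Int), (∀ x ∈ pre, test x = true) →
      suffix.foldl (fun cur n => if !(test n) then (PySem.List.remove? cur n).getD cur else cur) (pre ++ suffix)
        = pre ++ suffix.filter test := by
  intro suffix
  induction suffix with
  | nil => intro pre _; simp
  | cons n suf ih =>
    intro pre hpre
    rw [List.foldl_cons]
    by_cases hn : test n = true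
    · have : (pre ++ n :: suf) = (pre ++ [n]) ++ suf := by simp
      rw [hn]
      simp only [Bool.not_true, Bool.false_eq_true, if_false]
      rw [this, ih (pre ++ [n]) (by intro x hx; rcases List.mem_append.mp hx with h | h; exact hpre x h; simpa using (List.mem_singleton.mp h) ▸ hn)]
      simp [hn]
    · have hn' : test n = false := Bool.eq_false_iff.mpr hn
      have hnp : n ∉ pre := fun h => hn (hpre n h)
      rw [hn']
      simp only [Bool.not_false, if_true]
      rw [remove?_append_cons n pre suf hnp]
      simp only [Option.getD_some]
      rw [ih pre hpre]
      simp [hn']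

theorem aInner_eq_filter (ipl : List Int) (d : Int) (absol : Bool) (ns : List Int) :
    aInner ipl d absol ns = ns.filter (bTest d absol ipl) := by
  cases absol
  · have : aInner ipl d false ns
        = ns.foldl (fun cur n => if !(bTest d false ipl n) then (PySem.List.remove? cur n).getD cur else cur) ns := by
      unfold aInner
      simp only [Bool.false_and, Bool.true_and, Bool.not_false, Bool.false_eq_true, ite_false, condRel]
    rw [this]
    simpa using remove_fold (bTest d false ipl) ns [] (by simp)
  · have : aInner ipl d true ns
        = ns.foldl (fun cur n => if !(bTest d true ipl n) then (PySem.List.remove? cur n).getD cur else cur) ns := by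
      unfold aInner
      simp only [Bool.true_and, Bool.false_and, Bool.not_true, Bool.false_eq_true, ite_false, condAbs]
    rw [this]
    simpa using remove_fold (bTest d true ipl) ns [] (by simp)

theorem dGet?_append_right {α : Type} (l : String) : ∀ (p r : List (String × α)), l ∉ p.map Prod.fst →
    dGet? (p ++ r) l = dGet? r l := by
  intro p
  induction p with
  | nil => intro r _; rfl
  | cons e t ih =>
    intro r h
    have h2 : ¬(l = e.1 ∨ l ∈ t.map Prod.fst) := by simpa using h
    have he : e.1 ≠ l := fun hh => h2 (Or.inl hh.symm)
    simpa [dGet?, he] using ih r (fun hh => h2 (Or.inr hh))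

theorem dSet_append {α : Type} (l : String) (v : α) : ∀ (p : List (String × α)) (ns : α) (r : List (String × α)), l ∉ p.map Prod.fst →
    dSet (p ++ (l, ns) :: r) l v = p ++ (l, v) :: r := by
  intro p
  induction p with
  | nil => intro ns r _; simp [dSet]
  | cons e t ih =>
    intro ns r h
    have h2 : ¬(l = e.1 ∨ l ∈ t.map Prod.fst) := by simpa using h
    have he : e.1 ≠ l := fun hh => h2 (Or.inl hh.symm)
    simp [dSet, he, ih ns r (fun hh => h2 (Or.inr hh))]

theorem dDel_append {α : Type} (l : String) : ∀ (p : List (String × α)) (ns : α) (r : List (String × α)), l ∉ p.map Prod.fst →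
    dDel (p ++ (l, ns) :: r) l = p ++ r := by
  intro p
  induction p with
  | nil => intro ns r _; simp [dDel]
  | cons e t ih =>
    intro ns r h
    have h2 : ¬(l = e.1 ∨ l ∈ t.map Prod.fst) := by simpa using h
    have he : e.1 ≠ l := fun hh => h2 (Or.inl hh.symm)
    simp [dDel, he, ih ns r (fun hh => h2 (Or.inr hh))]

theorem dGet?_cons_self {α : Type} (l : String) (ns : α) (r : List (String × α)) :
    dGet? ((l, ns) :: r) l = some ns := by simp [dGet?]

def bEnt (post : List (String × List Int)) (d : Int) (absol : Bool) (e : String × List Int) : List (String × List Int) :=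
  match dGet? post e.1 with
  | none => []
  | some pl =>
    let kept := e.2.filter (bTest d absol pl)
    if kept.isEmpty then [] else [(e.1, kept)]

theorem bStep_eq_flatMap (post : List (String × List Int)) (d : Int) (absol : Bool)
    (lst : List (String × List Int)) :
    bStep post d absol lst = lst.flatMap (bEnt post d absol) := by
  unfold bStep
  have key : ∀ (lst acc : List (String × List Int)),
      lst.foldl (fun acc e =>
        match dGet? post e.1 with
        | none => acc
        | some pl =>
          let kept := e.2.filter (bTest d absol pl)
          if kept.isEmpty then acc else acc ++ [(e.1, kept)]) acc
      = acc ++ lst.flatMap (bEnt post d absol) := by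
    intro lst
    induction lst with
    | nil => intro acc; simp
    | cons e t ih =>
      intro acc
      rw [List.foldl_cons]
      cases hg : dGet? post e.1 with
      | none => rw [ih acc]; simp [bEnt, hg]
      | some pl =>
        by_cases hk : (e.2.filter (bTest d absol pl)).isEmpty
        · simp only [hk, if_true]; rw [ih acc]; simp [bEnt, hg, hk]
        · simp only [hk, Bool.false_eq_true, if_false]
          rw [ih (acc ++ [(e.1, e.2.filter (bTest d absol pl))])]
          simp [bEnt, hg, hk]
  simpa using key lst []

theorem aStep_go (ikey : List (String × List Int)) (d : Int) (absol : Bool) :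
    ∀ (rest done : List (String × List Int)), ((done ++ rest).map Prod.fst).Nodup →
      (rest.map Prod.fst).foldl (fun out l =>
        let out := match dGet? ikey l with
          | some ipl => dSet out l (aInner ipl d absol ((dGet? out l).getD []))
          | none => out
        if (dGet? ikey l).isNone || ((dGet? out l).getD []).isEmpty then dDel out l else out)
        (done ++ rest)
      = done ++ rest.flatMap (bEnt ikey d absol) := by
  intro rest
  induction rest with
  | nil => intro done _; simp
  | cons e t ih =>
    intro done hnd
    obtain ⟨l, ns⟩ := e
    have hm : ((done ++ (l, ns) :: t).map Prod.fst) = done.map Prod.fst ++ l :: t.map Prod.fst := by simp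
    rw [hm] at hnd
    have hnd2 : (l :: (done.map Prod.fst ++ t.map Prod.fst)).Nodup := List.nodup_middle.mp hnd
    have hld : l ∉ done.map Prod.fst := fun h => (List.nodup_cons.mp hnd2).1 (List.mem_append.mpr (Or.inl h))
    have hlt : l ∉ t.map Prod.fst := fun h => (List.nodup_cons.mp hnd2).1 (List.mem_append.mpr (Or.inr h))
    have hdt : ((done ++ t).map Prod.fst).Nodup := by
      have := (List.nodup_cons.mp hnd2).2; simpa using this
    rw [List.map_cons, List.foldl_cons]
    have hget : dGet? (done ++ (l, ns) :: t) l = some ns := by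
      rw [dGet?_append_right l done _ hld]; exact dGet?_cons_self l ns t
    cases hg : dGet? ikey l with
    | none =>
      simp only [Option.isNone_none, Bool.true_or, if_true]
      rw [dDel_append l done ns t hld]
      rw [ih done (by simpa using hdt)]
      simp [bEnt, hg]
    | some ipl =>
      simp only [Option.isNone_some, Bool.false_or]
      rw [hget]
      simp only [Option.getD_some]
      rw [dSet_append l _ done ns t hld]
      have hget2 : dGet? (done ++ (l, aInner ipl d absol ns) :: t) l = some (aInner ipl d absol ns) := by
        rw [dGet?_append_right l done _ hld]; exact dGet?_cons_self l _ t
      rw [hget2]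
      simp only [Option.getD_some]
      rw [aInner_eq_filter]
      by_cases hk : ((ns.filter (bTest d absol ipl)).isEmpty) = true
      · simp only [hk, if_true]
        rw [dDel_append l done _ t hld]
        rw [ih done (by simpa using hdt)]
        simp [bEnt, hg, hk]
      · simp only [hk, Bool.false_eq_true, if_false]
        have hre : done ++ (l, ns.filter (bTest d absol ipl)) :: t = (done ++ [(l, ns.filter (bTest d absol ipl))]) ++ t := by simp
        rw [hre, ih (done ++ [(l, ns.filter (bTest d absol ipl))]) (by simpa using hnd)]
        simp [bEnt, hg, hk]

theorem aStep_eq_bStep (ikey : List (String × List Int)) (d : Int) (absol : Bool)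
    (out : List (String × List Int)) (h : (out.map Prod.fst).Nodup) :
    aStep ikey d absol out = bStep ikey d absol out := by
  rw [bStep_eq_flatMap]
  have := aStep_go ikey d absol out [] (by simpa using h)
  simpa [aStep] using this

theorem bEnt_keys (post : List (String × List Int)) (d : Int) (absol : Bool) (e : String × List Int) :
    (bEnt post d absol e).map Prod.fst = [] ∨ (bEnt post d absol e).map Prod.fst = [e.1] := by
  unfold bEnt
  cases dGet? post e.1 with
  | none => left; rfl
  | some pl =>
    by_cases hk : ((e.2.filter (bTest d absol pl)).isEmpty) = true
    · left; simp [hk]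
    · right; simp [hk]

theorem flatMap_keys_sublist (post : List (String × List Int)) (d : Int) (absol : Bool) :
    ∀ lst : List (String × List Int),
      ((lst.flatMap (bEnt post d absol)).map Prod.fst).Sublist (lst.map Prod.fst) := by
  intro lst
  induction lst with
  | nil => simp
  | cons e t ih =>
    rw [List.flatMap_cons, List.map_cons, List.map_append]
    rcases bEnt_keys post d absol e with h | h
    · rw [h, List.nil_append]; exact ih.cons e.1
    · rw [h]; exact ih.cons₂ e.1

theorem nodup_bStep (post : List (String × List Int)) (d : Int) (absol : Bool)
    (out : List (String × List Int)) (h : (out.map Prod.fst).Nodup) :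
    ((bStep post d absol out).map Prod.fst).Nodup := by
  rw [bStep_eq_flatMap]
  exact (flatMap_keys_sublist post d absol out).nodup h

theorem dGet?_mem {α : Type} (k : String) : ∀ (dct : List (String × α)) (v : α), dGet? dct k = some v → (k, v) ∈ dct := by
  intro dct
  induction dct with
  | nil => intro v h; simp [dGet?] at h
  | cons e t ih =>
    intro v h
    by_cases he : e.1 = k
    · simp [dGet?, he] at h
      exact List.mem_cons.mpr (Or.inl (by cases e; simp_all))
    · simp [dGet?, he] at h
      exact List.mem_cons.mpr (Or.inr (ih v h))

theorem dGet?_isSome_of_mem {α : Type} (k : String) : ∀ (dct : List (String × α)), k ∈ dct.map Prod.fst → (dGet? dct k).isSome := by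
  intro dct
  induction dct with
  | nil => intro h; simp at h
  | cons e t ih =>
    intro h
    by_cases he : e.1 = k
    · simp [dGet?, he]
    · rcases (by simpa using h : k = e.1 ∨ k ∈ t.map Prod.fst) with h1 | h2
      · exact absurd h1.symm he
      · simpa [dGet?, he] using ih h2

theorem main_go (index : List (String × List (String × List Int))) (d : Int) (absol : Bool) :
    ∀ (ts : List String) (out : List (String × List Int)), (out.map Prod.fst).Nodup →
      proxRec index ts.reverse d absol (some out) = bLoop index d absol ts out := by
  intro ts
  induction ts with
  | nil => intro out _; rw [proxRec, bLoop]; simp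
  | cons t ts ih =>
    intro out h
    rw [List.reverse_cons, proxRec]
    have hne : ts.reverse ++ [t] ≠ [] := by simp
    rw [dif_neg hne]
    simp only [List.getLast?_concat, Option.getD_some, List.dropLast_concat]
    rw [bLoop]
    cases hg : dGet? index t with
    | none => rfl
    | some ikey =>
      show proxRec index ts.reverse d absol (some (aStep ikey d absol out))
          = bLoop index d absol ts (bStep ikey d absol out)
      rw [aStep_eq_bStep ikey d absol out h]
      exact ih (bStep ikey d absol out) (nodup_bStep ikey d absol out h)

-- ===== VERDICT (by name: the statement is the Claim_ definition above) =====
theorem proxRec_spec : Claim_equal_proxRec := by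
  intro index queryTerms d absol out_ _hDom hPre
  unfold Spec_proxRec
  unfold Pre_proxRec at hPre
  rw [Bool.and_eq_true, Bool.and_eq_true] at hPre
  obtain ⟨⟨_hidx, hinners'⟩, hPre⟩ := hPre
  have hinners : ∀ e ∈ index, (e.2.map Prod.fst).Nodup := by
    intro e he
    have := List.all_eq_true.mp hinners' e he
    simpa using this
  cases out_ with
  | some out =>
    have h : (out.map Prod.fst).Nodup := by simpa using hPre
    have := main_go index d absol queryTerms.reverse out h
    rw [List.reverse_reverse] at this
    rw [this]
    rfl
  | none =>
    rw [Bool.and_eq_true, Bool.and_eq_true] at hPre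
    obtain ⟨⟨hne', hmem'⟩, _hdup⟩ := hPre
    have hne : queryTerms ≠ [] := by simpa using hne'
    set key := (queryTerms.getLast?).getD "" with hkey
    obtain ⟨inner, hg⟩ : ∃ inner, dGet? index key = some inner := by
      have := dGet?_isSome_of_mem key index (by simpa using hmem')
      exact Option.isSome_iff_exists.mp this
    have hnd : (inner.map Prod.fst).Nodup := hinners (key, inner) (dGet?_mem key index inner hg)
    rw [proxRec, dif_neg hne]
    simp only [← hkey, hg, Option.getD_some]
    have hsplit : queryTerms = queryTerms.dropLast ++ [key] := by
      conv_lhs => rw [← List.dropLast_append_getLast hne]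
      rw [hkey, List.getLast?_eq_some_getLast hne]
      rfl
    have hmain := main_go index d absol queryTerms.dropLast.reverse inner hnd
    rw [List.reverse_reverse] at hmain
    rw [hmain]
    unfold proxRec_alt
    have hrev : queryTerms.reverse = key :: queryTerms.dropLast.reverse := by
      conv_lhs => rw [hsplit]
      simp
    rw [hrev]
    simp only [hg, Option.getD_some]
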